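-- pv_equiv track=rewrite | github.com/SedatCeyhan/Algorithms_Solutions | Akuna Capital/throttleGetaways.py | findBeforeMatrix
-- ===== SOURCE A (Python) =====
-- def findBeforeMatrix(after):
--     # Write your code here
--     if len(after) == 0 or len(after[0]) == 0: return []
--     row, col = len(after), len(after[0])
--     before = [[0] * (col) for i in range(row)]
--
--     # Base case: The 1 dimensional row and column
--     before[0][0] = after[0][0]
--     for i in range(1, col):
--         before[0][i] = after[0][i] - after[0][i - 1]
--
--     for j in range(1, row):
--         before[j][0] = after[j][0] - after[j - 1][0]
--
--     for i in range(1, row):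
--         for j in range(1, col):
--             val = after[i][j] - after[i][j - 1]
--             for r in range(0, i):
--                 val -= before[r][j]
--
--             before[i][j] = val
--
--     return before
-- ===== SOURCE B (Python) =====
-- def findBeforeMatrix(after):
--     # O(row*col) inverse 2D prefix sum: before[i][j] = after[i][j] - after[i-1][j] - after[i][j-1] + after[i-1][j-1]
--     if len(after) == 0 or len(after[0]) == 0:
--         return []
--     col = len(after[0])
--     return [[after[i][j]
--              - (after[i][j - 1] if j > 0 else 0)
--              - (after[i - 1][j] if i > 0 else 0)
--              + (after[i - 1][j - 1] if i > 0 and j > 0 else 0)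
--              for j in range(col)]
--             for i in range(len(after))]
-- ===== Notes on version B (the rewrite author's own statement) =====
-- stated objective: faster
-- what changed: Replaced the inner scan that re-sums the already-recovered column entries with the closed-form 2D inverse-difference formula before[i][j]=after[i][j]-after[i-1][j]-after[i][j-1]+after[i-1][j-1], computed in one pass.
import Mathlib
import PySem

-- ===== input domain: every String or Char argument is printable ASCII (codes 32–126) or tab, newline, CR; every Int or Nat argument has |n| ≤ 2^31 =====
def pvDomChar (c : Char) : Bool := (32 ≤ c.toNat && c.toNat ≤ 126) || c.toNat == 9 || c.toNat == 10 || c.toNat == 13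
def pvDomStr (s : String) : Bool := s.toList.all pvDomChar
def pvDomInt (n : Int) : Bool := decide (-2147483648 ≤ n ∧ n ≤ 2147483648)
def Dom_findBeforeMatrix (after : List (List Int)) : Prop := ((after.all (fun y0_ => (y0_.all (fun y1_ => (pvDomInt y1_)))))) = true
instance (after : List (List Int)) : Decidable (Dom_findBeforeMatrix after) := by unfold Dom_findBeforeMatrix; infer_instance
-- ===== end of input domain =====

-- B replaces A's O(row^2*col) inner re-summation of the recovered column with the closed-form
-- 2D inverse-difference before[i][j] = after[i][j] - after[i-1][j] - after[i][j-1] + after[i-1][j-1] (one pass).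


-- ===== PORT A =====
-- after[i][j] (in-range reads only, guaranteed by Pre_): getD with default 0
def g2 (m : List (List Int)) (i j : Nat) : Int := (m.getD i []).getD j 0
-- before[i][j] = v
def s2 (m : List (List Int)) (i j : Nat) (v : Int) : List (List Int) :=
  m.set i ((m.getD i []).set j v)

def findBeforeMatrix (after : List (List Int)) : List (List Int) :=
  if after.length = 0 ∨ (after.headD []).length = 0 then []
  else
    let row := after.length
    let col := (after.headD []).length
    let b0 := List.replicate row (List.replicate col (0 : Int))
    -- before[0][0] = after[0][0]
    let b1 := s2 b0 0 0 (g2 after 0 0)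
    -- for i in range(1, col): before[0][i] = after[0][i] - after[0][i-1]
    let b2 := (List.range' 1 (col - 1)).foldl
      (fun b i => s2 b 0 i (g2 after 0 i - g2 after 0 (i - 1))) b1
    -- for j in range(1, row): before[j][0] = after[j][0] - after[j-1][0]
    let b3 := (List.range' 1 (row - 1)).foldl
      (fun b j => s2 b j 0 (g2 after j 0 - g2 after (j - 1) 0)) b2
    -- nested interior loops, inner scan 'for r in range(0, i): val -= before[r][j]'
    (List.range' 1 (row - 1)).foldl
      (fun b i =>
        (List.range' 1 (col - 1)).foldl
          (fun b j =>
            let v0 := g2 after i j - g2 after i (j - 1)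
            let v := (List.range i).foldl (fun v r => v - g2 b r j) v0
            s2 b i j v) b) b3

-- ===== PORT B =====
def findBeforeMatrix_alt (after : List (List Int)) : List (List Int) :=
  if after.length = 0 ∨ (after.headD []).length = 0 then []
  else
    let col := (after.headD []).length
    (List.range after.length).map (fun i =>
      (List.range col).map (fun j =>
        g2 after i j
          - (if 0 < j then g2 after i (j - 1) else 0)
          - (if 0 < i then g2 after (i - 1) j else 0)
          + (if 0 < i ∧ 0 < j then g2 after (i - 1) (j - 1) else 0)))

-- ===== PRECONDITION & SPEC =====
-- Pre_ excludes ragged inputs where some row is shorter than the first row: there the Python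
-- (both A and B) raises IndexError reading after[i][j]; rows longer than the first are fine.
def Pre_findBeforeMatrix (after : List (List Int)) : Prop :=
  ∀ r ∈ after, (after.headD []).length ≤ r.length
instance (after : List (List Int)) : Decidable (Pre_findBeforeMatrix after) := by
  unfold Pre_findBeforeMatrix; infer_instance

def pvWitness_findBeforeMatrix : List (List Int) := [[1, 3], [4, 10]]

def Spec_findBeforeMatrix (after : List (List Int)) (out : List (List Int)) : Prop := out = findBeforeMatrix_alt after
instance (after : List (List Int)) (out : List (List Int)) : Decidable (Spec_findBeforeMatrix after out) := by unfold Spec_findBeforeMatrix; infer_instance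

-- ===== CLAIM (what is proved, stated in full; the proofs are below) =====
def Claim_equal_findBeforeMatrix : Prop := ∀ (after : List (List Int)), Dom_findBeforeMatrix after → Pre_findBeforeMatrix after → Spec_findBeforeMatrix after (findBeforeMatrix after)

-- ===== LEMMAS AND PROOFS =====

-- the intended entry value, shared shape of B's cell body
def ex (a : List (List Int)) (i j : Nat) : Int :=
  g2 a i j
    - (if 0 < j then g2 a i (j - 1) else 0)
    - (if 0 < i then g2 a (i - 1) j else 0)
    + (if 0 < i ∧ 0 < j then g2 a (i - 1) (j - 1) else 0)

def Shape (row col : Nat) (b : List (List Int)) : Prop :=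
  b.length = row ∧ ∀ r, r < row → (b.getD r []).length = col

theorem getD_set_list (l : List (List Int)) (i j : Nat) (x : List Int) :
    (l.set i x).getD j [] = if i = j then (if i < l.length then x else l.getD j []) else l.getD j [] := by
  simp [List.getD_eq_getElem?_getD, List.getElem?_set]
  split_ifs <;> simp_all

theorem getD_set_int (l : List Int) (i j : Nat) (x : Int) :
    (l.set i x).getD j 0 = if i = j then (if i < l.length then x else l.getD j 0) else l.getD j 0 := by
  simp [List.getD_eq_getElem?_getD, List.getElem?_set]
  split_ifs <;> simp_all

theorem shape_s2 {row col : Nat} {b : List (List Int)} (h : Shape row col b)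
    (i j : Nat) (v : Int) : Shape row col (s2 b i j v) := by
  obtain ⟨h1, h2⟩ := h
  refine ⟨by simp [s2, h1], fun r hr => ?_⟩
  unfold s2
  rw [getD_set_list]
  split_ifs with hij hlt
  · subst hij
    rw [List.length_set]
    exact h2 _ hr
  · exact h2 _ hr
  · exact h2 _ hr

theorem g2_s2 {row col : Nat} {b : List (List Int)} (h : Shape row col b)
    {i j : Nat} (hi : i < row) (hj : j < col) (v : Int) (i' j' : Nat) :
    g2 (s2 b i j v) i' j' = if i' = i ∧ j' = j then v else g2 b i' j' := by
  obtain ⟨h1, h2⟩ := h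
  have hlen : (b.getD i []).length = col := h2 i hi
  unfold g2 s2
  rw [getD_set_list]
  by_cases hii : i = i'
  · subst hii
    rw [if_pos rfl, if_pos (by omega), getD_set_int]
    by_cases hjj : j = j'
    · subst hjj
      rw [if_pos rfl, if_pos (by omega), if_pos ⟨rfl, rfl⟩]
    · rw [if_neg hjj, if_neg (by tauto)]
  · rw [if_neg hii, if_neg (by tauto)]

theorem g2_replicate (row col : Nat) (i j : Nat) :
    g2 (List.replicate row (List.replicate col (0 : Int))) i j = 0 := by
  unfold g2
  simp [List.getD_eq_getElem?_getD, List.getElem?_replicate]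
  split_ifs <;> simp

theorem shape_replicate (row col : Nat) :
    Shape row col (List.replicate row (List.replicate col (0 : Int))) := by
  refine ⟨by simp, fun r hr => ?_⟩
  rw [List.getD_eq_getElem?_getD]
  simp [hr]

-- foldl subtracting f over a list = subtract the sum
theorem foldl_sub_sum (f : Nat → Int) (l : List Nat) (v : Int) :
    l.foldl (fun v r => v - f r) v = v - (l.map f).sum := by
  induction l generalizing v with
  | nil => simp
  | cons x xs ih => simp [List.foldl_cons, ih]; ring

-- telescoping: column sums of ex give a row difference
theorem sum_ex_col (a : List (List Int)) (j : Nat) (hj : 0 < j) (i : Nat) (hi : 0 < i) :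
    ((List.range i).map (fun r => ex a r j)).sum = g2 a (i - 1) j - g2 a (i - 1) (j - 1) := by
  induction i with
  | zero => omega
  | succ n ih =>
    rw [List.range_succ, List.map_append, List.sum_append]
    simp only [List.map_cons, List.map_nil, List.sum_cons, List.sum_nil, add_zero]
    have h1 : n + 1 - 1 = n := rfl
    rw [h1]
    by_cases hn : 0 < n
    · rw [ih hn]
      unfold ex
      rw [if_pos hj, if_pos hn, if_pos ⟨hn, hj⟩]
      ring
    · have h0 : n = 0 := by omega
      subst h0
      simp only [List.range_zero, List.map_nil, List.sum_nil, zero_add]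
      unfold ex
      rw [if_pos hj, if_neg (lt_irrefl 0), if_neg (by omega)]
      ring

theorem if_cond_congr {P Q : Prop} [Decidable P] [Decidable Q] (h : P ↔ Q) (x y : Int) :
    (if P then x else y) = (if Q then x else y) := by
  split_ifs with h1 h2 <;> tauto

-- phase 2: first row filled
theorem phase2_lem (a : List (List Int)) (row col : Nat) (hr : 0 < row) (hc : 0 < col) :
    ∀ n, n ≤ col - 1 →
      Shape row col ((List.range' 1 n).foldl
          (fun b i => s2 b 0 i (g2 a 0 i - g2 a 0 (i - 1)))
          (s2 (List.replicate row (List.replicate col (0 : Int))) 0 0 (g2 a 0 0))) ∧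
      ∀ i j, g2 ((List.range' 1 n).foldl
          (fun b i => s2 b 0 i (g2 a 0 i - g2 a 0 (i - 1)))
          (s2 (List.replicate row (List.replicate col (0 : Int))) 0 0 (g2 a 0 0))) i j
        = if i = 0 ∧ j ≤ n then ex a 0 j else 0 := by
  intro n
  induction n with
  | zero =>
    intro _
    have hsh := shape_s2 (shape_replicate row col) 0 0 (g2 a 0 0)
    refine ⟨hsh, fun i j => ?_⟩
    rw [List.range'_zero, List.foldl_nil,
        g2_s2 (shape_replicate row col) hr hc (g2 a 0 0) i j, g2_replicate]
    split_ifs with h1 h2 h2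
    · rw [h1.2]
      unfold ex
      rw [if_neg (lt_irrefl 0),
          if_neg (show ¬ ((0:Nat) < 0 ∧ (0:Nat) < 0) by omega)]
      ring
    · omega
    · omega
    · rfl
  | succ n ih =>
    intro hn
    obtain ⟨hsh, hval⟩ := ih (by omega)
    rw [List.range'_1_concat, List.foldl_append, List.foldl_cons, List.foldl_nil]
    have hlt : 1 + n < col := by omega
    refine ⟨shape_s2 hsh 0 (1 + n) _, fun i j => ?_⟩
    rw [g2_s2 hsh hr hlt _ i j]
    split_ifs with h1 h2 h2
    · rw [h1.2]
      unfold ex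
      rw [if_pos (show 0 < 1 + n by omega), if_neg (lt_irrefl 0),
          if_neg (show ¬ ((0:Nat) < 0 ∧ 0 < 1 + n) by omega)]
      ring
    · omega
    · rw [hval, if_pos (show i = 0 ∧ j ≤ n by omega)]
    · rw [hval, if_neg (show ¬ (i = 0 ∧ j ≤ n) by omega)]

-- phase 3: first column filled
theorem phase3_lem (a : List (List Int)) (row col : Nat) (hr : 0 < row) (hc : 0 < col)
    (b2 : List (List Int)) (hsh : Shape row col b2)
    (hval : ∀ i j, g2 b2 i j = if i = 0 ∧ j ≤ col - 1 then ex a 0 j else 0) :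
    ∀ n, n ≤ row - 1 →
      Shape row col ((List.range' 1 n).foldl
          (fun b j => s2 b j 0 (g2 a j 0 - g2 a (j - 1) 0)) b2) ∧
      ∀ i j, g2 ((List.range' 1 n).foldl
          (fun b j => s2 b j 0 (g2 a j 0 - g2 a (j - 1) 0)) b2) i j
        = if (i = 0 ∧ j < col) ∨ (j = 0 ∧ i ≤ n) then ex a i j else 0 := by
  intro n
  induction n with
  | zero =>
    intro _
    refine ⟨hsh, fun i j => ?_⟩
    rw [List.range'_zero, List.foldl_nil, hval]
    split_ifs with h1 h2
    · rw [h1.1]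
    · omega
    · omega
    · rfl
  | succ n ih =>
    intro hn
    obtain ⟨hsh', hval'⟩ := ih (by omega)
    rw [List.range'_1_concat, List.foldl_append, List.foldl_cons, List.foldl_nil]
    have hlt : 1 + n < row := by omega
    refine ⟨shape_s2 hsh' (1 + n) 0 _, fun i j => ?_⟩
    rw [g2_s2 hsh' hlt hc _ i j]
    split_ifs with h1 h2 h2
    · rw [h1.1, h1.2]
      unfold ex
      rw [if_neg (lt_irrefl 0), if_pos (show 0 < 1 + n by omega),
          if_neg (show ¬ (0 < 1 + n ∧ (0:Nat) < 0) by omega)]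
      ring
    · omega
    · rw [hval', if_pos (show (i = 0 ∧ j < col) ∨ (j = 0 ∧ i ≤ n) by omega)]
    · rw [hval', if_neg (show ¬ ((i = 0 ∧ j < col) ∨ (j = 0 ∧ i ≤ n)) by omega)]

-- inner loop of the nested phase: row i gets its interior entries
theorem inner_lem (a : List (List Int)) (row col : Nat) (hc : 0 < col)
    (i : Nat) (hi1 : 1 ≤ i) (hir : i < row)
    (b : List (List Int)) (hsh : Shape row col b)
    (hval : ∀ i' j', g2 b i' j' =
      if (i' < i ∧ j' < col) ∨ (i' = 0 ∧ j' < col) ∨ (j' = 0 ∧ i' < row) then ex a i' j' else 0) :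
    ∀ m, m ≤ col - 1 →
      Shape row col ((List.range' 1 m).foldl
        (fun b j =>
          s2 b i j ((List.range i).foldl (fun v r => v - g2 b r j)
            (g2 a i j - g2 a i (j - 1)))) b) ∧
      ∀ i' j', g2 ((List.range' 1 m).foldl
        (fun b j =>
          s2 b i j ((List.range i).foldl (fun v r => v - g2 b r j)
            (g2 a i j - g2 a i (j - 1)))) b) i' j'
        = if (i' < i ∧ j' < col) ∨ (i' = 0 ∧ j' < col) ∨ (j' = 0 ∧ i' < row)
            ∨ (i' = i ∧ 0 < j' ∧ j' ≤ m) then ex a i' j' else 0 := by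
  intro m
  induction m with
  | zero =>
    intro _
    refine ⟨hsh, fun i' j' => ?_⟩
    rw [List.range'_zero, List.foldl_nil, hval]
    exact if_cond_congr (by omega) _ _
  | succ m ih =>
    intro hm
    obtain ⟨hsh', hval'⟩ := ih (by omega)
    rw [List.range'_1_concat, List.foldl_append, List.foldl_cons, List.foldl_nil]
    have hlt : 1 + m < col := by omega
    refine ⟨shape_s2 hsh' i (1 + m) _, fun i' j' => ?_⟩
    rw [g2_s2 hsh' hir hlt _ i' j']
    split_ifs with h1 h2 h2
    · -- the freshly written cell carries exactly ex a i (1+m)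
      rw [h1.1, h1.2, foldl_sub_sum]
      have hmap : (List.range i).map (fun r => g2
          ((List.range' 1 m).foldl (fun b j =>
            s2 b i j ((List.range i).foldl (fun v r => v - g2 b r j)
              (g2 a i j - g2 a i (j - 1)))) b) r (1 + m))
          = (List.range i).map (fun r => ex a r (1 + m)) := by
        apply List.map_congr_left
        intro r hr
        rw [List.mem_range] at hr
        rw [hval', if_pos (Or.inl ⟨hr, hlt⟩)]
      rw [hmap, sum_ex_col a (1 + m) (by omega) i (by omega)]
      unfold ex
      rw [if_pos (show 0 < 1 + m by omega), if_pos (show 0 < i by omega),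
          if_pos (show 0 < i ∧ 0 < 1 + m by omega)]
      ring
    · omega
    · rw [hval', if_pos (show (i' < i ∧ j' < col) ∨ (i' = 0 ∧ j' < col)
          ∨ (j' = 0 ∧ i' < row) ∨ (i' = i ∧ 0 < j' ∧ j' ≤ m) by omega)]
    · rw [hval', if_neg (show ¬ ((i' < i ∧ j' < col) ∨ (i' = 0 ∧ j' < col)
          ∨ (j' = 0 ∧ i' < row) ∨ (i' = i ∧ 0 < j' ∧ j' ≤ m)) by omega)]

-- outer loop of the nested phase
theorem outer_lem (a : List (List Int)) (row col : Nat) (hr : 0 < row) (hc : 0 < col)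
    (b3 : List (List Int)) (hsh : Shape row col b3)
    (hval : ∀ i j, g2 b3 i j = if (i = 0 ∧ j < col) ∨ (j = 0 ∧ i ≤ row - 1) then ex a i j else 0) :
    ∀ n, n ≤ row - 1 →
      Shape row col ((List.range' 1 n).foldl
        (fun b i => (List.range' 1 (col - 1)).foldl
          (fun b j =>
            s2 b i j ((List.range i).foldl (fun v r => v - g2 b r j)
              (g2 a i j - g2 a i (j - 1)))) b) b3) ∧
      ∀ i j, g2 ((List.range' 1 n).foldl
        (fun b i => (List.range' 1 (col - 1)).foldl
          (fun b j =>
            s2 b i j ((List.range i).foldl (fun v r => v - g2 b r j)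
              (g2 a i j - g2 a i (j - 1)))) b) b3) i j
        = if (i ≤ n ∧ j < col) ∨ (i = 0 ∧ j < col) ∨ (j = 0 ∧ i < row) then ex a i j else 0 := by
  intro n
  induction n with
  | zero =>
    intro _
    refine ⟨hsh, fun i j => ?_⟩
    rw [List.range'_zero, List.foldl_nil, hval]
    exact if_cond_congr (by omega) _ _
  | succ n ih =>
    intro hn
    obtain ⟨hsh', hval'⟩ := ih (by omega)
    rw [List.range'_1_concat, List.foldl_append, List.foldl_cons, List.foldl_nil]
    have h1n : 1 ≤ 1 + n := by omega
    have hnr : 1 + n < row := by omega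
    obtain ⟨hsh'', hval''⟩ := inner_lem a row col hc (1 + n) h1n hnr _ hsh'
      (fun i' j' => by rw [hval']; exact if_cond_congr (by omega) _ _)
      (col - 1) (le_refl _)
    refine ⟨hsh'', fun i j => ?_⟩
    rw [hval'']
    exact if_cond_congr (by omega) _ _

-- assembling the final matrix: a matrix of known shape and entries equals B's map form
theorem final_lem (a : List (List Int)) (row col : Nat) (hr : 0 < row)
    (F : List (List Int)) (hsh : Shape row col F)
    (hval : ∀ i j, g2 F i j =
      if (i ≤ row - 1 ∧ j < col) ∨ (i = 0 ∧ j < col) ∨ (j = 0 ∧ i < row) then ex a i j else 0) :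
    F = (List.range row).map (fun i => (List.range col).map (fun j =>
      g2 a i j
        - (if 0 < j then g2 a i (j - 1) else 0)
        - (if 0 < i then g2 a (i - 1) j else 0)
        + (if 0 < i ∧ 0 < j then g2 a (i - 1) (j - 1) else 0))) := by
  apply List.ext_getElem
  · rw [hsh.1]; simp
  · intro i h1 h2
    rw [hsh.1] at h1
    simp only [List.getElem_map, List.getElem_range]
    have hrl : (F.getD i []).length = col := hsh.2 i h1
    have e1 : F.getD i [] = F[i] := List.getD_eq_getElem F [] (by rw [hsh.1]; exact h1)
    rw [e1] at hrl
    apply List.ext_getElem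
    · rw [hrl]; simp
    · intro j hj1 hj2
      rw [hrl] at hj1
      have hv := hval i j
      rw [if_pos (by omega)] at hv
      unfold g2 at hv
      rw [e1, List.getD_eq_getElem (F[i]) 0 (by rw [hrl]; exact hj1)] at hv
      rw [hv]
      simp only [List.getElem_map, List.getElem_range]
      unfold ex
      rfl

-- ===== VERDICT (by name: the statement is the Claim_ definition above) =====
theorem findBeforeMatrix_spec : Claim_equal_findBeforeMatrix := by
  intro after _ _
  show findBeforeMatrix after = findBeforeMatrix_alt after
  unfold findBeforeMatrix findBeforeMatrix_alt
  by_cases h : after.length = 0 ∨ (after.headD []).length = 0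
  · rw [if_pos h, if_pos h]
  · rw [if_neg h, if_neg h]
    have hr : 0 < after.length := by omega
    have hc : 0 < (after.headD []).length := by omega
    obtain ⟨hsh2, hval2⟩ := phase2_lem after after.length (after.headD []).length hr hc
      ((after.headD []).length - 1) (le_refl _)
    obtain ⟨hsh3, hval3⟩ := phase3_lem after after.length (after.headD []).length hr hc
      _ hsh2 hval2 (after.length - 1) (le_refl _)
    obtain ⟨hshF, hvalF⟩ := outer_lem after after.length (after.headD []).length hr hc
      _ hsh3 hval3 (after.length - 1) (le_refl _)
    exact final_lem after after.length (after.headD []).length hr _ hshF hvalF
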